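-- pv_equiv track=rewrite | github.com/de-algorithm/coding-test-study | kangdaia/week14/pccp_sample_2.py | solution
-- ===== SOURCE A (Python) =====
-- def solution(land: list[list[int]]) -> int:
--     """
--     각 row 별 연속적인 칸의 갯수와 col 기록
--     transform
--     각 row 별 연속적인 칸 합함
--     ** 시간초과 오류
--
--     Args:
--         land (list[list[int]]): 1이 석유가 있는 공간, 0이 일반 땅인 2차원 공간 배열
--
--     Returns:
--         int: 석유 공간에 col을 선택했을 때, 최대로 뽑을 수 있는 석유량
--     """
--     n, m = len(land), len(land[0])
--     visited = [[False] * m for _ in range(n)]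
--     oil_cluster_ids = [[-1] * m for _ in range(n)]
--     cluster_id = 0
--     cluster_sizes = []
--
--     def get_compound(m_row, m_col, cluster_id):
--         if visited[m_row][m_col] or land[m_row][m_col] == 0:
--             return 0
--
--         visited[m_row][m_col] = True
--         oil_cluster_ids[m_row][m_col] = cluster_id
--         size = 1
--
--         for dx, dy in [[0, 1], [0, -1], [1, 0], [-1, 0]]:
--             move_row, move_col = m_row + dx, m_col + dy
--             if (
--                 0 <= move_row < n
--                 and 0 <= move_col < m
--                 and not visited[move_row][move_col]
--                 and land[move_row][move_col] == 1
--             ):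
--                 size += get_compound(move_row, move_col, cluster_id)
--         return size
--
--     for i in range(n):
--         for j in range(m):
--             if land[i][j] == 1 and not visited[i][j]:
--                 cluster_size = get_compound(i, j, cluster_id)
--                 cluster_sizes.append(cluster_size)
--                 cluster_id += 1
--
--     max_oil = 0
--     for j in range(m):
--         oil_in_column = 0
--         cluster_extracted = set()
--         for i in range(n):
--             if land[i][j] == 1:
--                 cluster_id = oil_cluster_ids[i][j]
--                 if cluster_id not in cluster_extracted:
--                     oil_in_column += cluster_sizes[cluster_id]
--                     cluster_extracted.add(cluster_id)
--         max_oil = max(max_oil, oil_in_column)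
--
--     return max_oil
-- ===== SOURCE B (Python) =====
-- def solution(land: list[list[int]]) -> int:
--     n, m = len(land), len(land[0])
--     seen = [[False] * m for _ in range(n)]
--     clusters = []  # (size, set of columns the cluster touches), in discovery order
--
--     for i in range(n):
--         for j in range(m):
--             if land[i][j] == 1 and not seen[i][j]:
--                 # iterative flood fill with an explicit stack (no recursion)
--                 size = 0
--                 cols = set()
--                 stack = [(i, j)]
--                 while stack:
--                     r, c = stack.pop()
--                     if 0 <= r < n and 0 <= c < m and not seen[r][c] and land[r][c] == 1:
--                         seen[r][c] = True
--                         size += 1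
--                         cols.add(c)
--                         for dr, dc in ((-1, 0), (1, 0), (0, -1), (0, 1)):
--                             stack.append((r + dr, c + dc))
--                 clusters.append((size, cols))
--
--     # invert: add each cluster's size once to every column it touches
--     acc = [0] * m
--     for size, cols in clusters:
--         for c in cols:
--             acc[c] += size
--     return max(acc, default=0)
-- ===== Notes on version B (the rewrite author's own statement) =====
-- stated objective: faster
-- what changed: Replaces the recursive DFS plus a per-column rescan that dedups cluster ids via a set with an iterative explicit-stack flood fill recording each cluster's size and set of touched columns, then inverts the aggregation: each cluster adds its size once to every column it touches in a per-column accumulator whose maximum is returned.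
import Mathlib
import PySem

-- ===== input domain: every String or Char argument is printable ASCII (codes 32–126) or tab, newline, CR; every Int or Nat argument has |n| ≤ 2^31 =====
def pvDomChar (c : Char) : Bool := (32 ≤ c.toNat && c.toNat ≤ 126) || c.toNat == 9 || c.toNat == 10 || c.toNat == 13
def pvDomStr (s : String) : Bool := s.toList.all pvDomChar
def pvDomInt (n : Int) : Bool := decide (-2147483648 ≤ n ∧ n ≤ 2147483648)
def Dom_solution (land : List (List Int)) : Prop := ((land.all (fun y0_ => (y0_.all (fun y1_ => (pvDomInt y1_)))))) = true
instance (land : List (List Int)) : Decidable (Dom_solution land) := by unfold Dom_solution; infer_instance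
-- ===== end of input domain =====

-- B replaces A's recursive DFS and per-column rescan (dedup of cluster ids) by an iterative
-- explicit-stack flood fill that records each cluster's size and set of touched columns, then
-- adds each cluster's size once to every touched column of an accumulator and takes its maximum.

-- ===== PORT A =====
-- Matrix access helpers shared by both ports.  Every matrix/grid access either port performs is
-- bounds-guarded (0 ≤ r < n, 0 ≤ c < m ≤ row length under Pre_), so the defaults of these total
-- accessors are never observed by the ports; they only make the functions total.
def cellAt (land : List (List Int)) (r c : Int) : Int :=
  if r < 0 ∨ c < 0 then 0 else (land.getD r.toNat []).getD c.toNat 0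

def getM {α : Type} (g : List (List α)) (r c : Int) (d : α) : α :=
  if r < 0 ∨ c < 0 then d else (g.getD r.toNat []).getD c.toNat d

def setMat {α : Type} (g : List (List α)) (r c : Int) (x : α) : List (List α) :=
  if r < 0 ∨ c < 0 then g else g.set r.toNat ((g.getD r.toNat []).set c.toNat x)

-- [[x] * m for _ in range(n)]
def mkMat {α : Type} (n m : Int) (x : α) : List (List α) :=
  List.replicate n.toNat (List.replicate m.toNat x)

-- the neighbour offsets of A's DFS, in A's iteration order
def dirsA : List (Int × Int) := [(0,1), (0,-1), (1,0), (-1,0)]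

-- A's recursive get_compound, with a fuel argument standing in for Python's unbounded recursion:
-- the recursion depth is at most one more than the number of unvisited cells, so the fuel
-- n*m+1 passed by `solution` is never exhausted.
set_option maxHeartbeats 1000000 in
mutual
def getCompound (land : List (List Int)) (n m : Int) :
    Nat → Int → Int → Int → List (List Bool) → List (List Int) →
    ((List (List Bool) × List (List Int)) × Int)
  | 0, _, _, _, vis, ids => ((vis, ids), 0)
  | f+1, r, c, cid, vis, ids =>
      if getM vis r c false || (cellAt land r c == 0) then ((vis, ids), 0)
      else goDirs land n m f r c cid dirsA (setMat vis r c true) (setMat ids r c cid) 1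
  termination_by f _ _ _ _ _ => (f, 0)

-- the `for dx, dy in ...` loop inside get_compound
def goDirs (land : List (List Int)) (n m : Int) (f : Nat) (r c cid : Int) :
    List (Int × Int) → List (List Bool) → List (List Int) → Int →
    ((List (List Bool) × List (List Int)) × Int)
  | [], vis, ids, size => ((vis, ids), size)
  | d :: ds, vis, ids, size =>
      if 0 ≤ r + d.1 ∧ r + d.1 < n ∧ 0 ≤ c + d.2 ∧ c + d.2 < m ∧
          getM vis (r + d.1) (c + d.2) false = false ∧ cellAt land (r + d.1) (c + d.2) = 1 then
        let p := getCompound land n m f (r + d.1) (c + d.2) cid vis ids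
        goDirs land n m f r c cid ds p.1.1 p.1.2 (size + p.2)
      else goDirs land n m f r c cid ds vis ids size
  termination_by ds _ _ _ => (f, ds.length + 1)
end

def solution (land : List (List Int)) : Int :=
  let n : Int := land.length
  let m : Int := (land.headI).length
  let s1 := (PySem.List.pyRange 0 n 1).foldl (fun st i =>
      (PySem.List.pyRange 0 m 1).foldl (fun st j =>
        if cellAt land i j = 1 ∧ getM st.1 i j false = false then
          let p := getCompound land n m (n.toNat * m.toNat + 1) i j st.2.2.1 st.1 st.2.1
          (p.1.1, p.1.2, st.2.2.1 + 1, st.2.2.2 ++ [p.2])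
        else st) st)
    ((mkMat n m false, mkMat n m (-1 : Int), (0 : Int), ([] : List Int)))
  (PySem.List.pyRange 0 m 1).foldl (fun maxOil j =>
    let q := (PySem.List.pyRange 0 n 1).foldl (fun (q : Int × PySem.Set Int) i =>
        if cellAt land i j = 1 then
          if PySem.Set.contains q.2 (getM s1.2.1 i j (-1)) then q
          else (q.1 + PySem.List.pyGetD s1.2.2.2 (getM s1.2.1 i j (-1)) 0,
                PySem.Set.add q.2 (getM s1.2.1 i j (-1)))
        else q) ((0 : Int), ([] : PySem.Set Int))
    max maxOil q.1) 0

-- ===== PORT B =====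
-- B's while-loop flood fill.  The Python list used as a stack is modelled with its TOP at the
-- HEAD: Python appends the four neighbours in the order (-1,0),(1,0),(0,-1),(0,1) and pops the
-- most recently appended first, so the pop order is (0,1),(0,-1),(1,0),(-1,0) = dirsB.
-- The fuel bounds the number of loop iterations (at most 1 + 5 * number of cells, since each of
-- the ≤ n*m markings pushes four entries); the fuel passed by solution_alt is never exhausted.
def dirsB : List (Int × Int) := [(0,1), (0,-1), (1,0), (-1,0)]

def fillLoop (land : List (List Int)) (n m : Int) :
    Nat → List (Int × Int) → List (List Bool) → Int → PySem.Set Int →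
    (List (List Bool) × Int × PySem.Set Int)
  | 0, _, vis, size, cols => (vis, size, cols)
  | _+1, [], vis, size, cols => (vis, size, cols)
  | f+1, (r, c) :: rest, vis, size, cols =>
      if 0 ≤ r ∧ r < n ∧ 0 ≤ c ∧ c < m ∧ getM vis r c false = false ∧ cellAt land r c = 1 then
        fillLoop land n m f (dirsB.map (fun d => (r + d.1, c + d.2)) ++ rest)
          (setMat vis r c true) (size + 1) (PySem.Set.add cols c)
      else fillLoop land n m f rest vis size cols

def solution_alt (land : List (List Int)) : Int :=
  let n : Int := land.length
  let m : Int := (land.headI).length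
  let s1 := (PySem.List.pyRange 0 n 1).foldl (fun st i =>
      (PySem.List.pyRange 0 m 1).foldl (fun st j =>
        if cellAt land i j = 1 ∧ getM st.1 i j false = false then
          let p := fillLoop land n m (5 * (n.toNat * m.toNat) + 2) [(i, j)] st.1 0 []
          (p.1, st.2 ++ [(p.2.1, p.2.2)])
        else st) st)
    ((mkMat n m false, ([] : List (Int × PySem.Set Int))))
  let acc := s1.2.foldl (fun acc sc =>
      sc.2.foldl (fun a c => PySem.List.pySetD a c (PySem.List.pyGetD a c 0 + sc.1)) acc)
    (List.replicate m.toNat (0 : Int))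
  PySem.List.maxD acc (fun x => x) 0

-- ===== PRECONDITION & SPEC =====
-- Pre_ excludes exactly the inputs on which Python A raises IndexError: the empty grid
-- (land[0]) and grids in which some row is shorter than row 0 (land[i][j] in the column scan).
def Pre_solution (land : List (List Int)) : Prop :=
  land ≠ [] ∧ ∀ row ∈ land, (land.headI).length ≤ row.length
instance (land : List (List Int)) : Decidable (Pre_solution land) := by
  unfold Pre_solution; infer_instance

def pvWitness_solution : List (List Int) := [[1, 0], [1, 1]]

def Spec_solution (land : List (List Int)) (out : Int) : Prop := out = solution_alt land
instance (land : List (List Int)) (out : Int) : Decidable (Spec_solution land out) := by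
  unfold Spec_solution; infer_instance

-- ===== CLAIM (what is proved, stated in full; the proofs are below) =====
def Claim_equal_solution : Prop :=
  ∀ (land : List (List Int)), Dom_solution land → Pre_solution land →
    Spec_solution land (solution land)


-- ===== LEMMAS AND PROOFS =====

-- ---- proof-side state: the common flood fill carrying everything both ports track ----
structure FS where
  vis : List (List Bool)
  ids : List (List Int)
  sz : Int
  cols : PySem.Set Int

set_option maxHeartbeats 1000000 in
mutual
def dfsM (land : List (List Int)) (n m : Int) :
    Nat → Int → Int → Int → FS → FS
  | 0, _, _, _, st => st
  | f+1, r, c, cid, st =>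
      if getM st.vis r c false || (cellAt land r c == 0) then st
      else runM land n m f cid (dirsA.map (fun d => (r + d.1, c + d.2)))
            ⟨setMat st.vis r c true, setMat st.ids r c cid, st.sz + 1, PySem.Set.add st.cols c⟩
  termination_by f _ _ _ _ => (f, 0)

def runM (land : List (List Int)) (n m : Int) (f : Nat) (cid : Int) :
    List (Int × Int) → FS → FS
  | [], st => st
  | (r, c) :: xs, st =>
      runM land n m f cid xs
        (if 0 ≤ r ∧ r < n ∧ 0 ≤ c ∧ c < m ∧ getM st.vis r c false = false ∧
            cellAt land r c = 1 then dfsM land n m f r c cid st else st)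
  termination_by xs _ => (f, xs.length + 1)
end

def Shape {α : Type} (n m : Int) (g : List (List α)) : Prop :=
  g.length = n.toNat ∧ ∀ row ∈ g, row.length = m.toNat

def cnt (g : List (List Bool)) : Nat := (g.map (fun row => row.countP (fun b => !b))).sum

def IBp (n m r c : Int) : Prop := 0 ≤ r ∧ r < n ∧ 0 ≤ c ∧ c < m

-- ---- matrix helper lemmas ----
theorem getD_set_ne {α : Type} (l : List α) (i j : Nat) (a d : α) (h : i ≠ j) :
    (l.set i a).getD j d = l.getD j d := by
  simp [List.getD_eq_getElem?_getD, List.getElem?_set_ne h]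

theorem getD_set_self {α : Type} (l : List α) (i : Nat) (a d : α) (h : i < l.length) :
    (l.set i a).getD i d = a := by
  simp [List.getD_eq_getElem?_getD, List.getElem?_set_self h]

theorem getD_mem_of_lt {α : Type} (l : List α) (i : Nat) (d : α) (h : i < l.length) :
    l.getD i d ∈ l := by
  rw [List.getD_eq_getElem _ _ h]
  exact List.getElem_mem h

theorem getM_setMat_ne {α : Type} (g : List (List α)) (r c : Int) (x : α) (r' c' : Int) (d : α)
    (h : ¬(r' = r ∧ c' = c)) : getM (setMat g r c x) r' c' d = getM g r' c' d := by
  unfold getM setMat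
  by_cases hg : r < 0 ∨ c < 0
  · simp [hg]
  · simp only [hg, if_false]
    by_cases hg' : r' < 0 ∨ c' < 0
    · simp [hg']
    · simp only [hg', if_false]
      by_cases hr2 : r.toNat = r'.toNat
      · have hrr : r' = r := by omega
        have hc : c' ≠ c := by tauto
        by_cases hrn : r.toNat < g.length
        · rw [← hr2, getD_set_self _ _ _ _ hrn, getD_set_ne]
          omega
        · rw [List.set_eq_of_length_le (by omega)]
      · rw [getD_set_ne _ _ _ _ _ hr2]

theorem getM_setMat_self {α : Type} (n m : Int) (g : List (List α)) (r c : Int) (x d : α)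
    (hs : Shape n m g) (h1 : 0 ≤ r) (h2 : r < n) (h3 : 0 ≤ c) (h4 : c < m) :
    getM (setMat g r c x) r c d = x := by
  obtain ⟨hl, hrow⟩ := hs
  unfold getM setMat
  have hg : ¬ (r < 0 ∨ c < 0) := by omega
  simp only [hg, if_false]
  have hrn : r.toNat < g.length := by omega
  have hcn : c.toNat < (g.getD r.toNat []).length := by
    rw [hrow _ (getD_mem_of_lt _ _ _ hrn)]; omega
  rw [getD_set_self _ _ _ _ hrn, getD_set_self _ _ _ _ (by simpa using hcn)]

theorem setMat_shape {α : Type} (n m : Int) (g : List (List α)) (r c : Int) (x : α)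
    (hs : Shape n m g) : Shape n m (setMat g r c x) := by
  obtain ⟨hl, hrow⟩ := hs
  unfold setMat
  by_cases hg : r < 0 ∨ c < 0
  · simp only [hg, if_true]; exact ⟨hl, hrow⟩
  · simp only [hg, if_false]
    by_cases hrn : r.toNat < g.length
    · refine ⟨by simp [hl], ?_⟩
      intro row hmem
      rcases List.mem_or_eq_of_mem_set hmem with h | h
      · exact hrow _ h
      · subst h
        rw [List.length_set]
        exact hrow _ (getD_mem_of_lt _ _ _ hrn)
    · rw [List.set_eq_of_length_le (by omega)]
      exact ⟨hl, hrow⟩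

theorem shape_mkMat {α : Type} (n m : Int) (x : α) : Shape n m (mkMat n m x) := by
  unfold mkMat Shape
  constructor
  · simp
  · intro row hmem
    rw [List.eq_of_mem_replicate hmem]
    simp

theorem getD_oob {α : Type} (l : List α) (i : Nat) (d : α) (h : l.length ≤ i) :
    l.getD i d = d := by
  rw [List.getD_eq_getElem?_getD, List.getElem?_eq_none_iff.mpr (by omega)]
  rfl

theorem getM_mkMat {α : Type} (n m : Int) (x : α) (r c : Int) : getM (mkMat n m x) r c x = x := by
  unfold getM mkMat
  by_cases hg : r < 0 ∨ c < 0
  · simp [hg]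
  · simp only [hg, if_false]
    by_cases hrn : r.toNat < n.toNat
    · have hrw : (List.replicate n.toNat (List.replicate m.toNat x)).getD r.toNat [] =
          List.replicate m.toNat x := by
        rw [List.getD_eq_getElem _ _ (by simpa using hrn), List.getElem_replicate]
      rw [hrw]
      by_cases hcn : c.toNat < m.toNat
      · rw [List.getD_eq_getElem _ _ (by simpa using hcn), List.getElem_replicate]
      · rw [getD_oob _ _ _ (by simpa using Nat.le_of_not_lt hcn)]
    · have hrw : (List.replicate n.toNat (List.replicate m.toNat x)).getD r.toNat [] =
          ([] : List α) := getD_oob _ _ _ (by simpa using Nat.le_of_not_lt hrn)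
      rw [hrw]
      simp

theorem cnt_le_aux (mm : Nat) : ∀ (g : List (List Bool)), (∀ row ∈ g, row.length = mm) →
    cnt g ≤ g.length * mm := by
  intro g
  induction g with
  | nil => intro _; simp [cnt]
  | cons row t ih =>
    intro h
    have h1 : row.countP (fun b => !b) ≤ mm := by
      rw [← h row (by simp)]
      exact List.countP_le_length
    have h2 := ih (fun rr hr => h rr (by simp [hr]))
    simp only [cnt, List.map_cons, List.sum_cons, List.length_cons] at *
    calc row.countP (fun b => !b) + (t.map (fun row => row.countP (fun b => !b))).sum
        ≤ mm + t.length * mm := by omega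
      _ = (t.length + 1) * mm := by ring
  
theorem cnt_le (n m : Int) (g : List (List Bool)) (hs : Shape n m g) :
    cnt g ≤ n.toNat * m.toNat := by
  obtain ⟨hl, hrow⟩ := hs
  have := cnt_le_aux m.toNat g hrow
  rwa [hl] at this

theorem sum_set_nat : ∀ (l : List Nat) (i : Nat) (a : Nat), i < l.length →
    (l.set i a).sum + l.getD i 0 = l.sum + a := by
  intro l
  induction l with
  | nil => intro i a h; simp at h
  | cons b t ih =>
    intro i a h
    cases i with
    | zero => simp [List.sum_cons]; omega
    | succ i =>
      have := ih i a (by simpa using Nat.lt_of_succ_lt_succ h)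
      simp only [List.set_cons_succ, List.sum_cons, List.getD_cons_succ]
      omega

theorem countP_row : ∀ (row : List Bool) (cn : Nat), cn < row.length →
    row.getD cn false = false →
    (row.set cn true).countP (fun b => !b) + 1 = row.countP (fun b => !b) := by
  intro row
  induction row with
  | nil => intro cn h; simp at h
  | cons b t ih =>
    intro cn h hv
    cases cn with
    | zero =>
      simp only [List.getD_cons_zero] at hv
      subst hv
      simp
    | succ cn =>
      have := ih cn (by simpa using Nat.lt_of_succ_lt_succ h) (by simpa using hv)
      simp only [List.set_cons_succ, List.countP_cons]
      omega

theorem cnt_setMat (n m : Int) (g : List (List Bool)) (r c : Int)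
    (hs : Shape n m g) (h1 : 0 ≤ r) (h2 : r < n) (h3 : 0 ≤ c) (h4 : c < m)
    (hf : getM g r c false = false) : cnt (setMat g r c true) + 1 = cnt g := by
  obtain ⟨hl, hrow⟩ := hs
  have hg : ¬ (r < 0 ∨ c < 0) := by omega
  have hrn : r.toNat < g.length := by omega
  have hcn : c.toNat < (g.getD r.toNat []).length := by
    rw [hrow _ (getD_mem_of_lt _ _ _ hrn)]; omega
  have hval : (g.getD r.toNat []).getD c.toNat false = false := by
    unfold getM at hf
    simpa [hg] using hf
  unfold setMat
  simp only [hg, if_false]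
  unfold cnt
  rw [List.map_set]
  have hsum := sum_set_nat (g.map (fun row => row.countP (fun b => !b))) r.toNat
    (((g.getD r.toNat []).set c.toNat true).countP (fun b => !b)) (by simpa using hrn)
  have hgetD : (g.map (fun row => row.countP (fun b => !b))).getD r.toNat 0 =
      (g.getD r.toNat []).countP (fun b => !b) := by
    rw [List.getD_eq_getElem _ _ (by simpa using hrn), List.getElem_map,
      List.getD_eq_getElem _ _ hrn]
  rw [hgetD] at hsum
  have hcp := countP_row (g.getD r.toNat []) c.toNat hcn hval
  omega

-- ---- relating A's recursive fill and the common fill ----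
theorem goDirs_shift (land : List (List Int)) (n m : Int) (f : Nat) (r c cid : Int) :
    ∀ (ds : List (Int × Int)) vis ids (size : Int),
      goDirs land n m f r c cid ds vis ids size =
        (((goDirs land n m f r c cid ds vis ids 0).1.1,
          (goDirs land n m f r c cid ds vis ids 0).1.2),
         size + (goDirs land n m f r c cid ds vis ids 0).2) := by
  intro ds
  induction ds with
  | nil => intro vis ids size; simp [goDirs]
  | cons d ds ih =>
    intro vis ids size
    simp only [goDirs]
    split_ifs with hg
    · rw [ih, ih ((getCompound land n m f (r + d.1) (c + d.2) cid vis ids).1.1)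
        ((getCompound land n m f (r + d.1) (c + d.2) cid vis ids).1.2)
        (0 + (getCompound land n m f (r + d.1) (c + d.2) cid vis ids).2)]
      simp [add_assoc]
    · rw [ih, ih vis ids 0]

def PA (land : List (List Int)) (n m : Int) (f : Nat) : Prop :=
  ∀ (r c cid : Int) vis ids (sz : Int) cols,
    (dfsM land n m f r c cid ⟨vis, ids, sz, cols⟩).vis = (getCompound land n m f r c cid vis ids).1.1 ∧
    (dfsM land n m f r c cid ⟨vis, ids, sz, cols⟩).ids = (getCompound land n m f r c cid vis ids).1.2 ∧
    (dfsM land n m f r c cid ⟨vis, ids, sz, cols⟩).sz = sz + (getCompound land n m f r c cid vis ids).2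

theorem projQ (land : List (List Int)) (n m : Int) (f : Nat) (hP : PA land n m f) :
    ∀ (ds : List (Int × Int)) (r c cid : Int) vis ids (sz : Int) cols,
      (runM land n m f cid (ds.map (fun d => (r + d.1, c + d.2))) ⟨vis, ids, sz, cols⟩).vis =
        (goDirs land n m f r c cid ds vis ids 0).1.1 ∧
      (runM land n m f cid (ds.map (fun d => (r + d.1, c + d.2))) ⟨vis, ids, sz, cols⟩).ids =
        (goDirs land n m f r c cid ds vis ids 0).1.2 ∧
      (runM land n m f cid (ds.map (fun d => (r + d.1, c + d.2))) ⟨vis, ids, sz, cols⟩).sz =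
        sz + (goDirs land n m f r c cid ds vis ids 0).2 := by
  intro ds
  induction ds with
  | nil => intro r c cid vis ids sz cols; simp [runM, goDirs]
  | cons d ds ih =>
    intro r c cid vis ids sz cols
    simp only [List.map_cons, runM, goDirs]
    split_ifs with hg
    · obtain ⟨e1, e2, e3⟩ := hP (r + d.1) (c + d.2) cid vis ids sz cols
      have heta : dfsM land n m f (r + d.1) (c + d.2) cid ⟨vis, ids, sz, cols⟩ =
          (⟨(getCompound land n m f (r + d.1) (c + d.2) cid vis ids).1.1,
            (getCompound land n m f (r + d.1) (c + d.2) cid vis ids).1.2,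
            sz + (getCompound land n m f (r + d.1) (c + d.2) cid vis ids).2,
            (dfsM land n m f (r + d.1) (c + d.2) cid ⟨vis, ids, sz, cols⟩).cols⟩ : FS) := by
        rw [← e1, ← e2, ← e3]
      rw [heta]
      obtain ⟨i1, i2, i3⟩ := ih r c cid
        ((getCompound land n m f (r + d.1) (c + d.2) cid vis ids).1.1)
        ((getCompound land n m f (r + d.1) (c + d.2) cid vis ids).1.2)
        (sz + (getCompound land n m f (r + d.1) (c + d.2) cid vis ids).2)
        ((dfsM land n m f (r + d.1) (c + d.2) cid ⟨vis, ids, sz, cols⟩).cols)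
      rw [i1, i2, i3]
      rw [goDirs_shift land n m f r c cid ds
        ((getCompound land n m f (r + d.1) (c + d.2) cid vis ids).1.1)
        ((getCompound land n m f (r + d.1) (c + d.2) cid vis ids).1.2)
        (0 + (getCompound land n m f (r + d.1) (c + d.2) cid vis ids).2)]
      refine ⟨rfl, rfl, by ring⟩
    · exact ih r c cid vis ids sz cols

theorem projA (land : List (List Int)) (n m : Int) : ∀ (f : Nat), PA land n m f := by
  intro f
  induction f with
  | zero => intro r c cid vis ids sz cols; simp [dfsM, getCompound]
  | succ f ih =>
    intro r c cid vis ids sz cols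
    simp only [dfsM, getCompound]
    split_ifs with hg
    · exact ⟨rfl, rfl, by simp⟩
    · obtain ⟨i1, i2, i3⟩ := projQ land n m f ih dirsA r c cid
        (setMat vis r c true) (setMat ids r c cid) (sz + 1) (PySem.Set.add cols c)
      rw [i1, i2, i3]
      rw [goDirs_shift land n m f r c cid dirsA (setMat vis r c true) (setMat ids r c cid) 1]
      refine ⟨rfl, rfl, by ring⟩

-- ---- qualitative effect of the common fill ----
def Good (land : List (List Int)) (n m cid : Int) (st st' : FS) : Prop :=
  Shape n m st'.vis ∧ Shape n m st'.ids ∧ cnt st'.vis ≤ cnt st.vis ∧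
  (∀ r c, getM st.vis r c false = true → getM st'.vis r c false = true) ∧
  (∀ r c, getM st'.vis r c false = true → getM st.vis r c false = true ∨
     (IBp n m r c ∧ cellAt land r c = 1 ∧ getM st'.ids r c (-1) = cid ∧ c ∈ st'.cols)) ∧
  (∀ r c, getM st'.vis r c false = getM st.vis r c false →
     getM st'.ids r c (-1) = getM st.ids r c (-1)) ∧
  (∀ j, j ∈ st'.cols → j ∈ st.cols ∨
     ∃ i, getM st'.vis i j false = true ∧ getM st.vis i j false = false) ∧
  (∀ j, j ∈ st.cols → j ∈ st'.cols) ∧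
  (st.cols.Nodup → st'.cols.Nodup) ∧ st.sz ≤ st'.sz

theorem Good_refl (land : List (List Int)) (n m cid : Int) (st : FS)
    (h1 : Shape n m st.vis) (h2 : Shape n m st.ids) : Good land n m cid st st := by
  refine ⟨h1, h2, le_refl _, fun r c h => h, fun r c h => Or.inl h, fun r c _ => rfl,
    fun j hj => Or.inl hj, fun j hj => hj, fun h => h, le_refl _⟩

theorem Good_trans (land : List (List Int)) (n m cid : Int) (st st1 st2 : FS)
    (g1 : Good land n m cid st st1) (g2 : Good land n m cid st1 st2) :
    Good land n m cid st st2 := by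
  obtain ⟨a1, b1, c1, d1, e1, f1, h1, i1, j1, k1⟩ := g1
  obtain ⟨a2, b2, c2, d2, e2, f2, h2, i2, j2, k2⟩ := g2
  refine ⟨a2, b2, le_trans c2 c1, ?_, ?_, ?_, ?_, ?_, ?_, le_trans k1 k2⟩
  · exact fun r c h => d2 r c (d1 r c h)
  · intro r c h
    rcases e2 r c h with h' | h'
    · rcases e1 r c h' with h'' | h''
      · exact Or.inl h''
      · refine Or.inr ⟨h''.1, h''.2.1, ?_, i2 _ h''.2.2.2⟩
        have hv2 : getM st2.vis r c false = getM st1.vis r c false := by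
          rw [h, h']
        rw [f2 r c hv2]
        exact h''.2.2.1
    · exact Or.inr h'
  · intro r c hv
    have hmid : getM st1.vis r c false = getM st.vis r c false := by
      cases hb : getM st.vis r c false with
      | true => rw [d1 r c hb]
      | false =>
        cases hb1 : getM st1.vis r c false with
        | true =>
          have h2t := d2 r c hb1
          rw [hv, hb] at h2t
          simp at h2t
        | false => rfl
    rw [f2 r c (by rw [hv, hmid]), f1 r c hmid]
  · intro j hj
    rcases h2 j hj with h' | ⟨i, hi1, hi2⟩
    · rcases h1 j h' with h'' | ⟨i, hi1, hi2⟩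
      · exact Or.inl h''
      · exact Or.inr ⟨i, d2 _ _ hi1, hi2⟩
    · refine Or.inr ⟨i, hi1, ?_⟩
      cases hb : getM st.vis i j false with
      | true => rw [d1 i j hb] at hi2; cases hi2
      | false => rfl
  · exact fun j hj => i2 j (i1 j hj)
  · exact fun h => j2 (j1 h)

theorem nodup_set_add (s : PySem.Set Int) (c : Int) (h : s.Nodup) :
    (PySem.Set.add s c).Nodup := PySem.Set.nodup_add s c h

theorem mem_set_add (s : PySem.Set Int) (c x : Int) :
    x ∈ PySem.Set.add s c ↔ x ∈ s ∨ x = c := PySem.Set.mem_add s c x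

theorem markGood (land : List (List Int)) (n m : Int) (r c cid : Int) (st : FS)
    (h1 : Shape n m st.vis) (h2 : Shape n m st.ids) (hb : IBp n m r c)
    (hv : getM st.vis r c false = false) (hc : cellAt land r c = 1) :
    Good land n m cid st
      ⟨setMat st.vis r c true, setMat st.ids r c cid, st.sz + 1, PySem.Set.add st.cols c⟩ := by
  obtain ⟨hb1, hb2, hb3, hb4⟩ := hb
  have hcnt := cnt_setMat n m st.vis r c h1 hb1 hb2 hb3 hb4 hv
  refine ⟨setMat_shape n m _ r c true h1, setMat_shape n m _ r c cid h2,
    show cnt (setMat st.vis r c true) ≤ cnt st.vis by omega,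
    ?_, ?_, ?_, ?_, ?_, ?_, show st.sz ≤ st.sz + 1 by omega⟩
  · intro r' c' h
    by_cases he : r' = r ∧ c' = c
    · rw [he.1, he.2] at h; rw [h] at hv; cases hv
    · rw [getM_setMat_ne _ _ _ _ _ _ _ he]; exact h
  · intro r' c' h
    by_cases he : r' = r ∧ c' = c
    · rw [he.1, he.2]
      refine Or.inr ⟨⟨hb1, hb2, hb3, hb4⟩, hc, ?_, ?_⟩
      · exact getM_setMat_self n m _ r c cid (-1) h2 hb1 hb2 hb3 hb4
      · exact (mem_set_add _ _ _).mpr (Or.inr rfl)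
    · rw [getM_setMat_ne _ _ _ _ _ _ _ he] at h; exact Or.inl h
  · intro r' c' h
    by_cases he : r' = r ∧ c' = c
    · rw [he.1, he.2] at h
      rw [getM_setMat_self n m _ r c true false h1 hb1 hb2 hb3 hb4, hv] at h
      cases h
    · exact getM_setMat_ne _ _ _ _ _ _ _ he
  · intro j hj
    rcases (mem_set_add _ _ _).mp hj with h | h
    · exact Or.inl h
    · subst h
      refine Or.inr ⟨r, ?_, hv⟩
      exact getM_setMat_self n m _ r j true false h1 hb1 hb2 hb3 hb4
  · intro j hj
    exact (mem_set_add _ _ _).mpr (Or.inl hj)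
  · exact nodup_set_add _ _

def PG (land : List (List Int)) (n m : Int) (f : Nat) : Prop :=
  ∀ (r c cid : Int) (st : FS), Shape n m st.vis → Shape n m st.ids →
    IBp n m r c → getM st.vis r c false = false → cellAt land r c = 1 →
    Good land n m cid st (dfsM land n m f r c cid st)

theorem specQ (land : List (List Int)) (n m : Int) (f : Nat) (hP : PG land n m f) :
    ∀ (l : List (Int × Int)) (st : FS) (cid : Int), Shape n m st.vis → Shape n m st.ids →
      Good land n m cid st (runM land n m f cid l st) := by
  intro l
  induction l with
  | nil => intro st cid h1 h2; simp only [runM]; exact Good_refl land n m cid st h1 h2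
  | cons p xs ih =>
    intro st cid h1 h2
    obtain ⟨r, c⟩ := p
    simp only [runM]
    split_ifs with hg
    · have g1 := hP r c cid st h1 h2 ⟨hg.1, hg.2.1, hg.2.2.1, hg.2.2.2.1⟩
        hg.2.2.2.2.1 hg.2.2.2.2.2
      exact Good_trans land n m cid _ _ _ g1 (ih _ cid g1.1 g1.2.1)
    · exact ih st cid h1 h2

theorem specP (land : List (List Int)) (n m : Int) : ∀ (f : Nat), PG land n m f := by
  intro f
  induction f with
  | zero =>
    intro r c cid st h1 h2 hb hv hc
    simp only [dfsM]
    exact Good_refl land n m cid st h1 h2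
  | succ f ih =>
    intro r c cid st h1 h2 hb hv hc
    simp only [dfsM, hv, hc]
    norm_num
    have g1 := markGood land n m r c cid st h1 h2 hb hv hc
    exact Good_trans land n m cid _ _ _ g1
      (specQ land n m f ih _ _ cid g1.1 g1.2.1)

theorem specRun (land : List (List Int)) (n m : Int) (f : Nat) (l : List (Int × Int))
    (st : FS) (cid : Int) (h1 : Shape n m st.vis) (h2 : Shape n m st.ids) :
    Good land n m cid st (runM land n m f cid l st) :=
  specQ land n m f (specP land n m f) l st cid h1 h2

theorem seedMarked (land : List (List Int)) (n m : Int) (f : Nat) (r c cid : Int) (st : FS)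
    (h1 : Shape n m st.vis) (h2 : Shape n m st.ids) (hb : IBp n m r c)
    (hv : getM st.vis r c false = false) (hc : cellAt land r c = 1) :
    getM (dfsM land n m (f+1) r c cid st).vis r c false = true := by
  simp only [dfsM, hv, hc]
  norm_num
  have g1 := markGood land n m r c cid st h1 h2 hb hv hc
  have g2 := specQ land n m f (specP land n m f) (dirsA.map (fun d => (r + d.1, c + d.2)))
    ⟨setMat st.vis r c true, setMat st.ids r c cid, st.sz + 1, PySem.Set.add st.cols c⟩
    cid g1.1 g1.2.1
  exact g2.2.2.2.1 r c (getM_setMat_self n m _ r c true false h1 hb.1 hb.2.1 hb.2.2.1 hb.2.2.2)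

-- ---- fuel irrelevance and the stack-loop simulation ----
theorem runM_append (land : List (List Int)) (n m : Int) (f : Nat) (cid : Int)
    (l1 l2 : List (Int × Int)) (st : FS) :
    runM land n m f cid (l1 ++ l2) st = runM land n m f cid l2 (runM land n m f cid l1 st) := by
  induction l1 generalizing st with
  | nil => simp [runM]
  | cons p xs ih =>
    obtain ⟨r, c⟩ := p
    simp only [List.cons_append, runM]
    exact ih _

theorem runM_irrel (land : List (List Int)) (n m : Int) : ∀ (k : Nat),
    ∀ (f f' : Nat) (l : List (Int × Int)) (st : FS) (cid : Int),
      Shape n m st.vis → Shape n m st.ids → cnt st.vis ≤ k → k < f → k < f' →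
      runM land n m f cid l st = runM land n m f' cid l st := by
  intro k
  induction k using Nat.strong_induction_on with
  | _ k IH =>
    intro f f' l st cid h1 h2 hcnt hf hf'
    induction l generalizing st with
    | nil => simp [runM]
    | cons p xs ihl =>
      obtain ⟨r, c⟩ := p
      simp only [runM]
      split_ifs with hg
      · obtain ⟨g1, g2, g3, g4, g5, g6⟩ := hg
        cases f with
        | zero => omega
        | succ fa =>
          cases f' with
          | zero => omega
          | succ fb =>
            have hcnt1 := cnt_setMat n m st.vis r c h1 g1 g2 g3 g4 g5
            simp only [dfsM, g5, g6]
            norm_num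
            have sh1 : Shape n m (setMat st.vis r c true) := setMat_shape n m _ r c true h1
            have sh2 : Shape n m (setMat st.ids r c cid) := setMat_shape n m _ r c cid h2
            have e1 : runM land n m fa cid (dirsA.map (fun d => (r + d.1, c + d.2)))
                  ⟨setMat st.vis r c true, setMat st.ids r c cid, st.sz + 1,
                   PySem.Set.add st.cols c⟩ =
                runM land n m fb cid (dirsA.map (fun d => (r + d.1, c + d.2)))
                  ⟨setMat st.vis r c true, setMat st.ids r c cid, st.sz + 1,
                   PySem.Set.add st.cols c⟩ :=
              IH (k - 1) (by omega) fa fb _ _ cid sh1 sh2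
                (by show cnt (setMat st.vis r c true) ≤ k - 1; omega) (by omega) (by omega)
            rw [e1]
            have gS := specRun land n m fb (dirsA.map (fun d => (r + d.1, c + d.2)))
              ⟨setMat st.vis r c true, setMat st.ids r c cid, st.sz + 1,
               PySem.Set.add st.cols c⟩ cid sh1 sh2
            refine ihl _ gS.1 gS.2.1 ?_
            have hle : cnt (runM land n m fb cid (dirsA.map (fun d => (r + d.1, c + d.2)))
                ⟨setMat st.vis r c true, setMat st.ids r c cid, st.sz + 1,
                 PySem.Set.add st.cols c⟩).vis ≤ cnt (setMat st.vis r c true) := gS.2.2.1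
            omega
      · exact ihl st h1 h2 hcnt

theorem sim (land : List (List Int)) (n m : Int) : ∀ (fB : Nat) (k : Nat)
    (vis : List (List Bool)) (stack : List (Int × Int)) (sz : Int) (cols : PySem.Set Int)
    (fA : Nat) (ids : List (List Int)) (cid : Int),
    Shape n m vis → Shape n m ids → cnt vis ≤ k → 5 * k + stack.length < fB → k < fA →
    fillLoop land n m fB stack vis sz cols =
      ((runM land n m fA cid stack ⟨vis, ids, sz, cols⟩).vis,
       (runM land n m fA cid stack ⟨vis, ids, sz, cols⟩).sz,
       (runM land n m fA cid stack ⟨vis, ids, sz, cols⟩).cols) := by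
  intro fB
  induction fB with
  | zero =>
    intro k vis stack sz cols fA ids cid _ _ _ hfb _
    omega
  | succ fb ih =>
    intro k vis stack sz cols fA ids cid h1 h2 hcnt hfb hfA
    match stack with
    | [] => simp [fillLoop, runM]
    | (r, c) :: rest =>
      simp only [fillLoop, runM]
      split_ifs with hg
      · obtain ⟨g1, g2, g3, g4, g5, g6⟩ := hg
        simp only [List.length_cons] at hfb
        cases fA with
        | zero => omega
        | succ fa =>
          have hcnt1 := cnt_setMat n m vis r c h1 g1 g2 g3 g4 g5
          simp only [dfsM, g5, g6]
          norm_num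
          have sh1 : Shape n m (setMat vis r c true) := setMat_shape n m _ r c true h1
          have sh2 : Shape n m (setMat ids r c cid) := setMat_shape n m _ r c cid h2
          have hlen : (dirsB.map (fun d => (r + d.1, c + d.2))).length = 4 := by
            simp [dirsB]
          rw [ih (k - 1) (setMat vis r c true)
            (dirsB.map (fun d => (r + d.1, c + d.2)) ++ rest) (sz + 1)
            (PySem.Set.add cols c) fa (setMat ids r c cid) cid sh1 sh2
            (by omega) (by simp only [List.length_append, hlen]; omega) (by omega)]
          have hd : dirsB = dirsA := rfl
          rw [hd, runM_append]
          have gS := specRun land n m fa (dirsA.map (fun d => (r + d.1, c + d.2)))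
            ⟨setMat vis r c true, setMat ids r c cid, sz + 1, PySem.Set.add cols c⟩ cid sh1 sh2
          have hcS : cnt (runM land n m fa cid (dirsA.map (fun d => (r + d.1, c + d.2)))
              ⟨setMat vis r c true, setMat ids r c cid, sz + 1,
               PySem.Set.add cols c⟩).vis ≤ k - 1 := by
            have hle : cnt (runM land n m fa cid (dirsA.map (fun d => (r + d.1, c + d.2)))
                ⟨setMat vis r c true, setMat ids r c cid, sz + 1,
                 PySem.Set.add cols c⟩).vis ≤ cnt (setMat vis r c true) := gS.2.2.1
            omega
          rw [runM_irrel land n m (k - 1) fa (fa + 1) rest _ cid gS.1 gS.2.1 hcS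
            (by omega) (by omega)]
      · exact ih k vis rest sz cols (fA) ids cid h1 h2 hcnt (by
          simp only [List.length_cons] at hfb
          omega) hfA

-- ---- the outer scan over seeds ----
def stepA (land : List (List Int)) (n m : Int)
    (st : List (List Bool) × List (List Int) × Int × List Int) (p : Int × Int) :
    List (List Bool) × List (List Int) × Int × List Int :=
  if cellAt land p.1 p.2 = 1 ∧ getM st.1 p.1 p.2 false = false then
    let q := getCompound land n m (n.toNat * m.toNat + 1) p.1 p.2 st.2.2.1 st.1 st.2.1
    (q.1.1, q.1.2, st.2.2.1 + 1, st.2.2.2 ++ [q.2])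
  else st

def stepB (land : List (List Int)) (n m : Int)
    (st : List (List Bool) × List (Int × PySem.Set Int)) (p : Int × Int) :
    List (List Bool) × List (Int × PySem.Set Int) :=
  if cellAt land p.1 p.2 = 1 ∧ getM st.1 p.1 p.2 false = false then
    let q := fillLoop land n m (5 * (n.toNat * m.toNat) + 2) [(p.1, p.2)] st.1 0 []
    (q.1, st.2 ++ [(q.2.1, q.2.2)])
  else st

def seeds (n m : Int) : List (Int × Int) :=
  (PySem.List.pyRange 0 n 1).flatMap (fun i => (PySem.List.pyRange 0 m 1).map (fun j => (i, j)))

def CPL (land : List (List Int)) (n m : Int)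
    (a : List (List Bool) × List (List Int) × Int × List Int)
    (b : List (List Bool) × List (Int × PySem.Set Int)) : Prop :=
  a.1 = b.1 ∧ Shape n m a.1 ∧ Shape n m a.2.1 ∧ a.2.2.1 = (b.2.length : Int) ∧
  a.2.2.2 = b.2.map (fun x => x.1) ∧ (∀ x ∈ b.2, 0 ≤ x.1 ∧ x.2.Nodup) ∧
  (∀ r c, getM a.1 r c false = true →
     IBp n m r c ∧ cellAt land r c = 1 ∧ 0 ≤ getM a.2.1 r c (-1) ∧
     getM a.2.1 r c (-1) < a.2.2.1 ∧
     c ∈ (b.2.getD (getM a.2.1 r c (-1)).toNat (0, [])).2) ∧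
  (∀ k : Nat, k < b.2.length → ∀ j ∈ (b.2.getD k (0, [])).2,
     ∃ i, getM a.1 i j false = true ∧ getM a.2.1 i j (-1) = (k : Int))

theorem getD_append_left {β : Type} (l1 l2 : List β) (i : Nat) (d : β) (h : i < l1.length) :
    (l1 ++ l2).getD i d = l1.getD i d := by
  rw [List.getD_eq_getElem?_getD, List.getElem?_append_left h, ← List.getD_eq_getElem?_getD]

theorem getD_append_snoc {β : Type} (l1 : List β) (x : β) (d : β) :
    (l1 ++ [x]).getD l1.length d = x := by
  rw [List.getD_eq_getElem?_getD, List.getElem?_append_right (le_refl _)]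
  simp

theorem stepCPL (land : List (List Int)) (n m : Int)
    (a : List (List Bool) × List (List Int) × Int × List Int)
    (b : List (List Bool) × List (Int × PySem.Set Int)) (p : Int × Int)
    (h : CPL land n m a b) (hb : IBp n m p.1 p.2) :
    CPL land n m (stepA land n m a p) (stepB land n m b p) ∧
    (cellAt land p.1 p.2 = 1 → getM (stepA land n m a p).1 p.1 p.2 false = true) ∧
    (∀ r c, getM a.1 r c false = true → getM (stepA land n m a p).1 r c false = true) := by
  obtain ⟨c1, c2, c3, c4, c5, c6, c7, c8⟩ := h
  obtain ⟨r, c⟩ := p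
  obtain ⟨hb1, hb2, hb3, hb4⟩ := hb
  by_cases hg : cellAt land r c = 1 ∧ getM a.1 r c false = false
  · -- the seed starts a new cluster
    have hval : 0 ≤ r ∧ r < n ∧ 0 ≤ c ∧ c < m ∧ getM a.1 r c false = false ∧
        cellAt land r c = 1 := ⟨hb1, hb2, hb3, hb4, hg.2, hg.1⟩
    have hcle := cnt_le n m a.1 c2
    have hsingle : ∀ f, runM land n m f a.2.2.1 [(r, c)] ⟨a.1, a.2.1, 0, []⟩ =
        dfsM land n m f r c a.2.2.1 ⟨a.1, a.2.1, 0, []⟩ := by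
      intro f
      simp only [runM]
      rw [if_pos hval]
    have hirrel := runM_irrel land n m (cnt a.1) (n.toNat * m.toNat + 1) (cnt a.1 + 1)
      [(r, c)] ⟨a.1, a.2.1, 0, []⟩ a.2.2.1 c2 c3 (le_refl _) (by omega) (by omega)
    have hdfs : dfsM land n m (n.toNat * m.toNat + 1) r c a.2.2.1 ⟨a.1, a.2.1, 0, []⟩ =
        dfsM land n m (cnt a.1 + 1) r c a.2.2.1 ⟨a.1, a.2.1, 0, []⟩ := by
      rw [← hsingle, hirrel, hsingle]
    obtain ⟨q1, q2, q3⟩ := projA land n m (n.toNat * m.toNat + 1) r c a.2.2.1 a.1 a.2.1 0 []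
    rw [hdfs] at q1 q2 q3
    have good := specP land n m (cnt a.1 + 1) r c a.2.2.1 ⟨a.1, a.2.1, 0, []⟩ c2 c3
      ⟨hb1, hb2, hb3, hb4⟩ hg.2 hg.1
    obtain ⟨ga, gb, gc, gd, ge, gf, gg, gh, gi, gj⟩ := good
    have hmark := seedMarked land n m (cnt a.1) r c a.2.2.1 ⟨a.1, a.2.1, 0, []⟩ c2 c3
      ⟨hb1, hb2, hb3, hb4⟩ hg.2 hg.1
    have hfill : fillLoop land n m (5 * (n.toNat * m.toNat) + 2) [(r, c)] a.1 0 [] =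
        ((dfsM land n m (cnt a.1 + 1) r c a.2.2.1 ⟨a.1, a.2.1, 0, []⟩).vis,
         (dfsM land n m (cnt a.1 + 1) r c a.2.2.1 ⟨a.1, a.2.1, 0, []⟩).sz,
         (dfsM land n m (cnt a.1 + 1) r c a.2.2.1 ⟨a.1, a.2.1, 0, []⟩).cols) := by
      rw [sim land n m (5 * (n.toNat * m.toNat) + 2) (cnt a.1) a.1 [(r, c)] 0 []
        (cnt a.1 + 1) a.2.1 a.2.2.1 c2 c3 (le_refl _) (by simp; omega) (by omega), hsingle]
    set S := dfsM land n m (cnt a.1 + 1) r c a.2.2.1 ⟨a.1, a.2.1, 0, []⟩ with hS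
    have eA : stepA land n m a (r, c) = (S.vis, S.ids, a.2.2.1 + 1, a.2.2.2 ++ [S.sz]) := by
      simp only [stepA]
      rw [if_pos hg, q1, q2]
      have : (getCompound land n m (n.toNat * m.toNat + 1) r c a.2.2.1 a.1 a.2.1).2 = S.sz := by
        omega
      rw [this]
    have eB : stepB land n m b (r, c) = (S.vis, b.2 ++ [(S.sz, S.cols)]) := by
      simp only [stepB]
      rw [← c1, if_pos hg, hfill]
    rw [eA, eB]
    have hK : 0 ≤ a.2.2.1 := by rw [c4]; positivity
    refine ⟨⟨rfl, ga, gb, ?_, ?_, ?_, ?_, ?_⟩, fun _ => hmark, fun r' c' hv => gd r' c' hv⟩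
    · simp only [List.length_append, List.length_cons, List.length_nil]
      rw [c4]; push_cast; ring
    · simp only [List.map_append, List.map_cons, List.map_nil]
      rw [c5]
    · intro x hx
      rcases List.mem_append.mp hx with hx | hx
      · exact c6 x hx
      · simp only [List.mem_cons, List.not_mem_nil, or_false] at hx
        subst hx
        exact ⟨by simpa using gj, by simpa using gi (List.nodup_nil)⟩
    · intro r' c' hv'
      rcases ge r' c' hv' with hold | hnew
      · obtain ⟨hIB', hcell', hid0, hidlt, hcmem⟩ := c7 r' c' hold
        have hideq : getM S.ids r' c' (-1) = getM a.2.1 r' c' (-1) := by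
          have : getM S.vis r' c' false = getM a.1 r' c' false := by rw [hv', hold]
          simpa using gf r' c' this
        refine ⟨hIB', hcell', by rw [hideq]; exact hid0,
          by show getM S.ids r' c' (-1) < a.2.2.1 + 1; rw [hideq]; omega, ?_⟩
        rw [hideq, getD_append_left]
        · exact hcmem
        · rw [c4] at hidlt; omega
      · obtain ⟨hIB', hcell', hid, hcm⟩ := hnew
        refine ⟨hIB', hcell', by rw [hid]; exact hK,
          by show getM S.ids r' c' (-1) < a.2.2.1 + 1; rw [hid]; omega, ?_⟩
        rw [hid]
        have : a.2.2.1.toNat = b.2.length := by omega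
        rw [this, getD_append_snoc]
        exact hcm
    · intro k hk j hj
      simp only [List.length_append, List.length_cons, List.length_nil] at hk
      by_cases hky : k < b.2.length
      · rw [getD_append_left _ _ _ _ hky] at hj
        obtain ⟨i, hvis, hid⟩ := c8 k hky j hj
        refine ⟨i, gd i j hvis, ?_⟩
        have : getM S.vis i j false = getM a.1 i j false := by rw [gd i j hvis, hvis]
        rw [gf i j this]
        exact hid
      · have hkeq : k = b.2.length := by omega
        subst hkeq
        rw [getD_append_snoc] at hj
        rcases gg j hj with hemp | ⟨i, hvis', hvis0⟩
        · simp at hemp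
        · refine ⟨i, hvis', ?_⟩
          rcases ge i j hvis' with hold | hnew
          · rw [hold] at hvis0; cases hvis0
          · rw [hnew.2.2.1, c4]
  · -- no new cluster: both sides are unchanged
    have eA : stepA land n m a (r, c) = a := by
      simp only [stepA]
      rw [if_neg hg]
    have eB : stepB land n m b (r, c) = b := by
      simp only [stepB]
      rw [← c1, if_neg hg]
    rw [eA, eB]
    refine ⟨⟨c1, c2, c3, c4, c5, c6, c7, c8⟩, ?_, fun r' c' hv => hv⟩
    intro hcell
    cases hvv : getM a.1 r c false with
    | true => rfl
    | false => exact absurd ⟨hcell, hvv⟩ hg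

theorem foldCPL (land : List (List Int)) (n m : Int) : ∀ (L : List (Int × Int)) a b,
    CPL land n m a b → (∀ p ∈ L, IBp n m p.1 p.2) →
    CPL land n m (L.foldl (stepA land n m) a) (L.foldl (stepB land n m) b) ∧
    (∀ p ∈ L, cellAt land p.1 p.2 = 1 →
       getM (L.foldl (stepA land n m) a).1 p.1 p.2 false = true) ∧
    (∀ r c, getM a.1 r c false = true →
       getM (L.foldl (stepA land n m) a).1 r c false = true) := by
  intro L
  induction L with
  | nil => intro a b h _; exact ⟨h, by simp, fun r c hv => hv⟩
  | cons p L ih =>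
    intro a b h hIB
    obtain ⟨hstep, hmark, hmono⟩ := stepCPL land n m a b p h (hIB p (by simp))
    obtain ⟨ih1, ih2, ih3⟩ := ih (stepA land n m a p) (stepB land n m b p) hstep
      (fun q hq => hIB q (by simp [hq]))
    refine ⟨ih1, ?_, ?_⟩
    · intro q hq hcell
      rcases List.mem_cons.mp hq with hqp | hq'
      · subst hqp
        exact ih3 q.1 q.2 (hmark hcell)
      · exact ih2 q hq' hcell
    · intro r c hv
      exact ih3 r c (hmono r c hv)

-- ---- phase 2 ----
def colStep (land : List (List Int)) (ids : List (List Int)) (sizes : List Int) (j : Int)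
    (q : Int × PySem.Set Int) (i : Int) : Int × PySem.Set Int :=
  if cellAt land i j = 1 then
    if PySem.Set.contains q.2 (getM ids i j (-1)) then q
    else (q.1 + PySem.List.pyGetD sizes (getM ids i j (-1)) 0,
          PySem.Set.add q.2 (getM ids i j (-1)))
  else q

def idsl (land : List (List Int)) (ids : List (List Int)) (I : List Int) (j : Int) : List Int :=
  (I.filter (fun i => decide (cellAt land i j = 1))).map (fun i => getM ids i j (-1))

theorem contains_iff (s : PySem.Set Int) (k : Int) :
    PySem.Set.contains s k = true ↔ k ∈ s := by
  simp [PySem.Set.contains]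

theorem set_add_toFinset (s : PySem.Set Int) (k : Int) :
    (PySem.Set.add s k).toFinset = insert k s.toFinset := by
  ext x
  simp only [List.mem_toFinset, PySem.Set.mem_add, Finset.mem_insert]
  tauto

theorem pyGetD_nonneg (l : List Int) (j : Int) (d : Int) (h : 0 ≤ j) :
    PySem.List.pyGetD l j d = l.getD j.toNat d := by
  have hj : j = (j.toNat : Int) := by omega
  conv_lhs => rw [hj]
  rw [PySem.List.pyGetD_natCast]

theorem colFold (land : List (List Int)) (ids : List (List Int)) (sizes : List Int) (j : Int) :
    ∀ (I : List Int) (oil : Int) (seen : PySem.Set Int),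
      (I.foldl (colStep land ids sizes j) (oil, seen)).1 =
        oil + ∑ k ∈ ((idsl land ids I j).toFinset \ seen.toFinset),
                PySem.List.pyGetD sizes k 0 := by
  intro I
  induction I with
  | nil => intro oil seen; simp [idsl]
  | cons i I ih =>
    intro oil seen
    simp only [List.foldl_cons]
    by_cases hcell : cellAt land i j = 1
    · have hids : idsl land ids (i :: I) j = getM ids i j (-1) :: idsl land ids I j := by
        simp [idsl, hcell]
      by_cases hmem : getM ids i j (-1) ∈ seen
      · have hstep : colStep land ids sizes j (oil, seen) i = (oil, seen) := by
          simp only [colStep]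
          rw [if_pos hcell, if_pos ((contains_iff _ _).mpr hmem)]
        rw [hstep, ih oil seen, hids, List.toFinset_cons,
          Finset.insert_sdiff_of_mem _ (List.mem_toFinset.mpr hmem)]
      · have hstep : colStep land ids sizes j (oil, seen) i =
            (oil + PySem.List.pyGetD sizes (getM ids i j (-1)) 0,
             PySem.Set.add seen (getM ids i j (-1))) := by
          simp only [colStep]
          rw [if_pos hcell, if_neg (by rw [contains_iff]; exact hmem)]
        rw [hstep, ih, set_add_toFinset, Finset.sdiff_insert, hids, List.toFinset_cons]
        have hnm : getM ids i j (-1) ∉ seen.toFinset := fun hx => hmem (List.mem_toFinset.mp hx)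
        have hsplit : insert (getM ids i j (-1)) (idsl land ids I j).toFinset \ seen.toFinset =
            insert (getM ids i j (-1))
              (((idsl land ids I j).toFinset \ seen.toFinset).erase (getM ids i j (-1))) := by
          ext x
          simp only [Finset.mem_sdiff, Finset.mem_insert, Finset.mem_erase]
          constructor
          · rintro ⟨hx | hx, hx2⟩
            · exact Or.inl hx
            · by_cases hxe : x = getM ids i j (-1)
              · exact Or.inl hxe
              · exact Or.inr ⟨hxe, hx, hx2⟩
          · rintro (hx | ⟨hx1, hx2, hx3⟩)
            · exact ⟨Or.inl hx, hx ▸ hnm⟩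
            · exact ⟨Or.inr hx2, hx3⟩
        rw [hsplit, Finset.sum_insert (Finset.notMem_erase _ _)]
        ring
    · have hstep : colStep land ids sizes j (oil, seen) i = (oil, seen) := by
        simp only [colStep]
        rw [if_neg hcell]
      have hids : idsl land ids (i :: I) j = idsl land ids I j := by
        simp [idsl, hcell]
      rw [hstep, ih, hids]

theorem accInner : ∀ (cs : List Int), cs.Nodup → (∀ c ∈ cs, 0 ≤ c) →
    ∀ (acc : List Int) (s j : Int), 0 ≤ j → j.toNat < acc.length →
    (cs.foldl (fun a c => PySem.List.pySetD a c (PySem.List.pyGetD a c 0 + s)) acc).length =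
      acc.length ∧
    PySem.List.pyGetD
        (cs.foldl (fun a c => PySem.List.pySetD a c (PySem.List.pyGetD a c 0 + s)) acc) j 0 =
      PySem.List.pyGetD acc j 0 + (if j ∈ cs then s else 0) := by
  intro cs
  induction cs with
  | nil => intro _ _ acc s j _ _; simp
  | cons c0 cs ih =>
    intro hnd hpos acc s j hj hjlen
    have hc0 : 0 ≤ c0 := hpos c0 (by simp)
    have hnd' := (List.nodup_cons.mp hnd)
    simp only [List.foldl_cons]
    have hlen : (PySem.List.pySetD acc c0 (PySem.List.pyGetD acc c0 0 + s)).length =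
        acc.length := PySem.List.length_pySetD acc c0 _
    obtain ⟨ihl, ihv⟩ := ih hnd'.2 (fun c hc => hpos c (by simp [hc]))
      (PySem.List.pySetD acc c0 (PySem.List.pyGetD acc c0 0 + s)) s j hj (by omega)
    refine ⟨by rw [ihl, hlen], ?_⟩
    rw [ihv]
    by_cases he : j = c0
    · subst he
      have hget : PySem.List.pyGetD (PySem.List.pySetD acc j (PySem.List.pyGetD acc j 0 + s))
          j 0 = PySem.List.pyGetD acc j 0 + s := by
        rw [PySem.List.pySetD_of_nonneg _ _ hj, pyGetD_nonneg _ _ _ hj,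
          getD_set_self _ _ _ _ hjlen]
      rw [hget, if_neg hnd'.1, if_pos (by simp)]
      ring
    · have hget : PySem.List.pyGetD (PySem.List.pySetD acc c0 (PySem.List.pyGetD acc c0 0 + s))
          j 0 = PySem.List.pyGetD acc j 0 := by
        rw [PySem.List.pySetD_of_nonneg _ _ hc0, pyGetD_nonneg _ _ _ hj,
          getD_set_ne _ _ _ _ _ (by omega), ← pyGetD_nonneg _ _ _ hj]
      rw [hget]
      simp [List.mem_cons, he]

theorem accOuter : ∀ (cls : List (Int × PySem.Set Int)) (acc : List Int) (j : Int),
    (∀ cl ∈ cls, cl.2.Nodup ∧ ∀ c ∈ cl.2, 0 ≤ c) → 0 ≤ j → j.toNat < acc.length →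
    (cls.foldl (fun a sc =>
        sc.2.foldl (fun a c => PySem.List.pySetD a c (PySem.List.pyGetD a c 0 + sc.1)) a)
      acc).length = acc.length ∧
    PySem.List.pyGetD
        (cls.foldl (fun a sc =>
          sc.2.foldl (fun a c => PySem.List.pySetD a c (PySem.List.pyGetD a c 0 + sc.1)) a)
        acc) j 0 =
      PySem.List.pyGetD acc j 0 +
        (cls.map (fun cl => if j ∈ cl.2 then cl.1 else 0)).sum := by
  intro cls
  induction cls with
  | nil => intro acc j _ _ _; simp
  | cons cl cls ih =>
    intro acc j hcl hj hjlen
    have hhead := hcl cl (by simp)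
    simp only [List.foldl_cons]
    obtain ⟨hl1, hv1⟩ := accInner cl.2 hhead.1 hhead.2 acc cl.1 j hj hjlen
    obtain ⟨hl2, hv2⟩ := ih
      (cl.2.foldl (fun a c => PySem.List.pySetD a c (PySem.List.pyGetD a c 0 + cl.1)) acc) j
      (fun c hc => hcl c (by simp [hc])) hj (by omega)
    refine ⟨by rw [hl2, hl1], ?_⟩
    rw [hv2, hv1]
    simp only [List.map_cons, List.sum_cons]
    ring

theorem listSum_indexed (g : (Int × PySem.Set Int) → Int) :
    ∀ (cls : List (Int × PySem.Set Int)),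
      (cls.map g).sum = ((List.range cls.length).map (fun k => g (cls.getD k (0, [])))).sum := by
  intro cls
  induction cls using List.reverseRecOn with
  | nil => simp
  | append_singleton l x ih =>
    rw [List.map_append, List.sum_append, ih]
    simp only [List.length_append, List.length_cons, List.length_nil]
    rw [List.range_succ, List.map_append, List.sum_append]
    congr 1
    · apply congrArg
      apply List.map_congr_left
      intro k hk
      rw [getD_append_left _ _ _ _ (List.mem_range.mp hk)]
    · simp

theorem rangeSum_toFinset (h : Nat → Int) : ∀ (n : Nat),
    ((List.range n).map h).sum = ∑ k ∈ Finset.range n, h k := by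
  intro n
  induction n with
  | zero => simp
  | succ n ih => rw [List.range_succ, List.map_append, List.sum_append, ih,
      Finset.sum_range_succ]; simp

theorem maxEq : ∀ (vals : List Int), (∀ v ∈ vals, 0 ≤ v) →
    vals.foldl (fun mo v => max mo v) 0 = PySem.List.maxD vals (fun x => x) 0 := by
  intro vals h
  cases vals with
  | nil =>
    unfold PySem.List.maxD
    rw [(PySem.List.max?_eq_none_iff [] _).mpr rfl]
    rfl
  | cons a t =>
    unfold PySem.List.maxD
    rw [PySem.List.max?_id_cons]
    simp only [Option.getD_some, List.foldl_cons]
    rw [max_eq_right (h a (by simp))]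

theorem nested_fold_eq_seeds {σ : Type} (n m : Int) (f : σ → (Int × Int) → σ) (init : σ) :
    (PySem.List.pyRange 0 n 1).foldl (fun st i =>
      (PySem.List.pyRange 0 m 1).foldl (fun st j => f st (i, j)) st) init =
    (seeds n m).foldl f init := by
  unfold seeds
  rw [List.foldl_flatMap]
  apply PySem.List.foldl_congr_mem
  intro acc i _
  rw [List.foldl_map]

theorem mem_seeds (n m i j : Int) (h : IBp n m i j) : (i, j) ∈ seeds n m := by
  unfold seeds
  rw [List.mem_flatMap]
  exact ⟨i, PySem.List.mem_pyRange_one.mpr ⟨h.1, h.2.1⟩,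
    List.mem_map.mpr ⟨j, PySem.List.mem_pyRange_one.mpr ⟨h.2.2.1, h.2.2.2⟩, rfl⟩⟩

theorem seeds_IB (n m : Int) : ∀ p ∈ seeds n m, IBp n m p.1 p.2 := by
  intro p hp
  unfold seeds at hp
  rw [List.mem_flatMap] at hp
  obtain ⟨i, hi, hpj⟩ := hp
  obtain ⟨j, hj, rfl⟩ := List.mem_map.mp hpj
  have h1 := PySem.List.mem_pyRange_one.mp hi
  have h2 := PySem.List.mem_pyRange_one.mp hj
  exact ⟨h1.1, h1.2, h2.1, h2.2⟩

theorem initCPL (land : List (List Int)) (n m : Int) :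
    CPL land n m (mkMat n m false, mkMat n m (-1 : Int), (0 : Int), ([] : List Int))
      (mkMat n m false, ([] : List (Int × PySem.Set Int))) := by
  refine ⟨rfl, shape_mkMat n m false, shape_mkMat n m (-1), by simp, by simp, by simp,
    ?_, by simp⟩
  intro r c hv
  rw [getM_mkMat] at hv
  cases hv

theorem accLen : ∀ (cls : List (Int × PySem.Set Int)) (acc : List Int),
    (cls.foldl (fun a sc =>
        sc.2.foldl (fun a c => PySem.List.pySetD a c (PySem.List.pyGetD a c 0 + sc.1)) a)
      acc).length = acc.length := by
  intro cls
  induction cls with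
  | nil => intro acc; rfl
  | cons cl cls ih =>
    intro acc
    simp only [List.foldl_cons]
    rw [ih]
    generalize cl.1 = s
    induction cl.2 generalizing acc with
    | nil => rfl
    | cons c0 cs ih2 =>
      simp only [List.foldl_cons]
      rw [ih2, PySem.List.length_pySetD]

theorem getD_map_fst : ∀ (l : List (Int × PySem.Set Int)) (k : Nat), k < l.length →
    (l.map (fun x => x.1)).getD k 0 = (l.getD k (0, ([] : PySem.Set Int))).1 := by
  intro l
  induction l with
  | nil => intro k h; simp at h
  | cons x l ih =>
    intro k h
    cases k with
    | zero => rfl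
    | succ k => exact ih k (by simpa using Nat.lt_of_succ_lt_succ h)

theorem colEq (land : List (List Int)) (n m : Int)
    (a : List (List Bool) × List (List Int) × Int × List Int)
    (b : List (List Bool) × List (Int × PySem.Set Int)) (h : CPL land n m a b)
    (hcov : ∀ i j, IBp n m i j → cellAt land i j = 1 → getM a.1 i j false = true)
    (j : Int) (hj0 : 0 ≤ j) (hjm : j < m) :
    ∑ k ∈ (idsl land a.2.1 (PySem.List.pyRange 0 n 1) j).toFinset,
        PySem.List.pyGetD a.2.2.2 k 0 =
      (b.2.map (fun cl => if j ∈ cl.2 then cl.1 else 0)).sum := by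
  obtain ⟨c1, c2, c3, c4, c5, c6, c7, c8⟩ := h
  rw [listSum_indexed, rangeSum_toFinset]
  have hsf : ∑ k ∈ Finset.range b.2.length,
      (fun k => (fun cl => if j ∈ cl.2 then cl.1 else 0) (b.2.getD k (0, []))) k =
      ∑ k ∈ (Finset.range b.2.length).filter (fun k => j ∈ (b.2.getD k (0, [])).2),
        (b.2.getD k (0, [])).1 := by
    rw [Finset.sum_filter]
  rw [hsf]
  have himg : (idsl land a.2.1 (PySem.List.pyRange 0 n 1) j).toFinset =
      Finset.image (fun k : Nat => (k : Int))
        ((Finset.range b.2.length).filter (fun k => j ∈ (b.2.getD k (0, [])).2)) := by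
    ext kk
    simp only [List.mem_toFinset, Finset.mem_image, Finset.mem_filter, Finset.mem_range]
    constructor
    · intro hkk
      unfold idsl at hkk
      obtain ⟨i, hi, rfl⟩ := List.mem_map.mp hkk
      rw [List.mem_filter] at hi
      obtain ⟨hi1, hi2⟩ := hi
      have hib := PySem.List.mem_pyRange_one.mp hi1
      have hcell : cellAt land i j = 1 := by simpa using hi2
      have hvis := hcov i j ⟨hib.1, hib.2, hj0, hjm⟩ hcell
      obtain ⟨hIB, _, hid0, hidlt, hcm⟩ := c7 i j hvis
      refine ⟨(getM a.2.1 i j (-1)).toNat, ⟨?_, hcm⟩, by omega⟩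
      rw [c4] at hidlt
      omega
    · rintro ⟨k, ⟨hk, hkj⟩, rfl⟩
      obtain ⟨i, hvis, hid⟩ := c8 k hk j hkj
      obtain ⟨hIB, hcell, _, _, _⟩ := c7 i j hvis
      unfold idsl
      apply List.mem_map.mpr
      refine ⟨i, List.mem_filter.mpr ⟨PySem.List.mem_pyRange_one.mpr ⟨hIB.1, hIB.2.1⟩,
        by simpa using hcell⟩, hid⟩
  rw [himg, Finset.sum_image (by intro x _ y _ hxy; simpa using hxy)]
  apply Finset.sum_congr rfl
  intro k hk
  rw [Finset.mem_filter, Finset.mem_range] at hk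
  rw [PySem.List.pyGetD_natCast, c5]
  exact getD_map_fst b.2 k hk.1

theorem phase2_eq (land : List (List Int)) (n m : Int) (hm0 : 0 ≤ m)
    (a : List (List Bool) × List (List Int) × Int × List Int)
    (b : List (List Bool) × List (Int × PySem.Set Int)) (h : CPL land n m a b)
    (hcov : ∀ i j, IBp n m i j → cellAt land i j = 1 → getM a.1 i j false = true) :
    (PySem.List.pyRange 0 m 1).foldl (fun maxOil j =>
        max maxOil (((PySem.List.pyRange 0 n 1).foldl (colStep land a.2.1 a.2.2.2 j)
          ((0 : Int), ([] : PySem.Set Int))).1)) 0 =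
    PySem.List.maxD
      (b.2.foldl (fun acc sc => sc.2.foldl (fun a2 c =>
          PySem.List.pySetD a2 c (PySem.List.pyGetD a2 c 0 + sc.1)) acc)
        (List.replicate m.toNat (0 : Int))) (fun x => x) 0 := by
  have c6 := h.2.2.2.2.2.1
  have c7 := h.2.2.2.2.2.2.1
  have c8 := h.2.2.2.2.2.2.2
  have hlen : (b.2.foldl (fun acc sc => sc.2.foldl (fun a2 c =>
      PySem.List.pySetD a2 c (PySem.List.pyGetD a2 c 0 + sc.1)) acc)
      (List.replicate m.toNat (0 : Int))).length = m.toNat := by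
    rw [accLen]; simp
  have hclfacts : ∀ cl ∈ b.2, cl.2.Nodup ∧ ∀ c ∈ cl.2, 0 ≤ c := by
    intro cl hcl
    refine ⟨(c6 cl hcl).2, ?_⟩
    intro c hc
    obtain ⟨k, hk, hcleq⟩ := List.mem_iff_getElem.mp hcl
    have hgd : b.2.getD k (0, []) = cl := by rw [List.getD_eq_getElem _ _ hk, hcleq]
    obtain ⟨i, hvis, _⟩ := c8 k hk c (by rw [hgd]; exact hc)
    exact (c7 i c hvis).1.2.2.1
  have hrep : ∀ j : Int, 0 ≤ j → j < m →
      PySem.List.pyGetD (List.replicate m.toNat (0 : Int)) j 0 = 0 := by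
    intro j hj0 hjm
    rw [pyGetD_nonneg _ _ _ hj0,
      List.getD_eq_getElem _ _ (by simpa using (by omega : j.toNat < m.toNat)),
      List.getElem_replicate]
  have hval : ∀ j : Int, 0 ≤ j → j < m →
      PySem.List.pyGetD (b.2.foldl (fun acc sc => sc.2.foldl (fun a2 c =>
          PySem.List.pySetD a2 c (PySem.List.pyGetD a2 c 0 + sc.1)) acc)
        (List.replicate m.toNat (0 : Int))) j 0 =
      ((PySem.List.pyRange 0 n 1).foldl (colStep land a.2.1 a.2.2.2 j)
        ((0 : Int), ([] : PySem.Set Int))).1 := by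
    intro j hj0 hjm
    obtain ⟨_, hv⟩ := accOuter b.2 (List.replicate m.toNat 0) j hclfacts hj0
      (by simpa using (by omega : j.toNat < m.toNat))
    rw [hv, hrep j hj0 hjm, colFold]
    rw [show (([] : PySem.Set Int).toFinset) = (∅ : Finset Int) from rfl, Finset.sdiff_empty]
    rw [colEq land n m a b h hcov j hj0 hjm]
  have hpos : ∀ v ∈ (b.2.foldl (fun acc sc => sc.2.foldl (fun a2 c =>
      PySem.List.pySetD a2 c (PySem.List.pyGetD a2 c 0 + sc.1)) acc)
      (List.replicate m.toNat (0 : Int))), 0 ≤ v := by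
    intro v hv
    obtain ⟨t, ht, rfl⟩ := List.mem_iff_getElem.mp hv
    have htm : t < m.toNat := by omega
    have h1 : (b.2.foldl (fun acc sc => sc.2.foldl (fun a2 c =>
        PySem.List.pySetD a2 c (PySem.List.pyGetD a2 c 0 + sc.1)) acc)
        (List.replicate m.toNat (0 : Int)))[t] =
        PySem.List.pyGetD (b.2.foldl (fun acc sc => sc.2.foldl (fun a2 c =>
          PySem.List.pySetD a2 c (PySem.List.pyGetD a2 c 0 + sc.1)) acc)
        (List.replicate m.toNat (0 : Int))) (t : Int) 0 := by
      rw [pyGetD_nonneg _ _ _ (by positivity)]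
      simp only [Int.toNat_natCast]
      rw [List.getD_eq_getElem _ _ ht]
    rw [h1]
    obtain ⟨_, hv2⟩ := accOuter b.2 (List.replicate m.toNat 0) (t : Int) hclfacts
      (by positivity) (by simpa using htm)
    rw [hv2, hrep (t : Int) (by positivity) (by omega)]
    have : (0:Int) ≤ (b.2.map (fun cl => if (t : Int) ∈ cl.2 then cl.1 else 0)).sum := by
      apply List.sum_nonneg
      intro x hx
      obtain ⟨cl, hcl, rfl⟩ := List.mem_map.mp hx
      split_ifs with hmem
      · exact (c6 cl hcl).1
      · exact le_refl 0
    omega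
  calc (PySem.List.pyRange 0 m 1).foldl (fun maxOil j =>
        max maxOil (((PySem.List.pyRange 0 n 1).foldl (colStep land a.2.1 a.2.2.2 j)
          ((0 : Int), ([] : PySem.Set Int))).1)) 0
      = (PySem.List.pyRange 0 m 1).foldl (fun maxOil j =>
          max maxOil (PySem.List.pyGetD (b.2.foldl (fun acc sc => sc.2.foldl (fun a2 c =>
              PySem.List.pySetD a2 c (PySem.List.pyGetD a2 c 0 + sc.1)) acc)
            (List.replicate m.toNat (0 : Int))) j 0)) 0 := by
        apply PySem.List.foldl_congr_mem
        intro acc j hj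
        have hb := PySem.List.mem_pyRange_one.mp hj
        rw [hval j hb.1 hb.2]
    _ = ((PySem.List.pyRange 0 m 1).map (fun j =>
          PySem.List.pyGetD (b.2.foldl (fun acc sc => sc.2.foldl (fun a2 c =>
              PySem.List.pySetD a2 c (PySem.List.pyGetD a2 c 0 + sc.1)) acc)
            (List.replicate m.toNat (0 : Int))) j 0)).foldl (fun mo v => max mo v) 0 := by
        rw [List.foldl_map]
    _ = (b.2.foldl (fun acc sc => sc.2.foldl (fun a2 c =>
          PySem.List.pySetD a2 c (PySem.List.pyGetD a2 c 0 + sc.1)) acc)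
        (List.replicate m.toNat (0 : Int))).foldl (fun mo v => max mo v) 0 := by
        have hm : ((((b.2.foldl (fun acc sc => sc.2.foldl (fun a2 c =>
            PySem.List.pySetD a2 c (PySem.List.pyGetD a2 c 0 + sc.1)) acc)
            (List.replicate m.toNat (0 : Int))).length : Nat) : Int)) = m := by
          rw [hlen]; omega
        have hpr : PySem.List.pyRange 0 m 1 = PySem.List.pyRange (0 : Int)
            ((((b.2.foldl (fun acc sc => sc.2.foldl (fun a2 c =>
              PySem.List.pySetD a2 c (PySem.List.pyGetD a2 c 0 + sc.1)) acc)
              (List.replicate m.toNat (0 : Int))).length : Nat) : Int)) 1 := by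
          rw [hm]
        rw [hpr, PySem.List.map_pyGetD_pyRange_zero']
    _ = PySem.List.maxD (b.2.foldl (fun acc sc => sc.2.foldl (fun a2 c =>
          PySem.List.pySetD a2 c (PySem.List.pyGetD a2 c 0 + sc.1)) acc)
        (List.replicate m.toNat (0 : Int))) (fun x => x) 0 := maxEq _ hpos

theorem main_equiv (land : List (List Int)) : solution land = solution_alt land := by
  have hm0 : (0 : Int) ≤ ((land.headI).length : Int) := by positivity
  obtain ⟨hC, hcov', hmono⟩ := foldCPL land (land.length : Int) ((land.headI).length : Int)
    (seeds (land.length : Int) ((land.headI).length : Int))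
    (mkMat (land.length : Int) ((land.headI).length : Int) false,
     mkMat (land.length : Int) ((land.headI).length : Int) (-1 : Int), (0 : Int),
     ([] : List Int))
    (mkMat (land.length : Int) ((land.headI).length : Int) false,
     ([] : List (Int × PySem.Set Int)))
    (initCPL land (land.length : Int) ((land.headI).length : Int))
    (seeds_IB (land.length : Int) ((land.headI).length : Int))
  have hcov : ∀ i j, IBp (land.length : Int) ((land.headI).length : Int) i j →
      cellAt land i j = 1 →
      getM ((seeds (land.length : Int) ((land.headI).length : Int)).foldl
        (stepA land (land.length : Int) ((land.headI).length : Int))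
        (mkMat (land.length : Int) ((land.headI).length : Int) false,
         mkMat (land.length : Int) ((land.headI).length : Int) (-1 : Int), (0 : Int),
         ([] : List Int))).1 i j false = true :=
    fun i j hib hc => hcov' (i, j) (mem_seeds _ _ i j hib) hc
  show (PySem.List.pyRange 0 ((land.headI).length : Int) 1).foldl (fun maxOil j =>
      max maxOil (((PySem.List.pyRange 0 (land.length : Int) 1).foldl
        (colStep land
          ((PySem.List.pyRange 0 (land.length : Int) 1).foldl (fun st i =>
            (PySem.List.pyRange 0 ((land.headI).length : Int) 1).foldl (fun st j =>
              stepA land (land.length : Int) ((land.headI).length : Int) st (i, j)) st)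
            (mkMat (land.length : Int) ((land.headI).length : Int) false,
             mkMat (land.length : Int) ((land.headI).length : Int) (-1 : Int), (0 : Int),
             ([] : List Int))).2.1
          ((PySem.List.pyRange 0 (land.length : Int) 1).foldl (fun st i =>
            (PySem.List.pyRange 0 ((land.headI).length : Int) 1).foldl (fun st j =>
              stepA land (land.length : Int) ((land.headI).length : Int) st (i, j)) st)
            (mkMat (land.length : Int) ((land.headI).length : Int) false,
             mkMat (land.length : Int) ((land.headI).length : Int) (-1 : Int), (0 : Int),
             ([] : List Int))).2.2.2
          j) ((0 : Int), ([] : PySem.Set Int))).1)) 0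
    = PySem.List.maxD
        (((PySem.List.pyRange 0 (land.length : Int) 1).foldl (fun st i =>
            (PySem.List.pyRange 0 ((land.headI).length : Int) 1).foldl (fun st j =>
              stepB land (land.length : Int) ((land.headI).length : Int) st (i, j)) st)
            (mkMat (land.length : Int) ((land.headI).length : Int) false,
             ([] : List (Int × PySem.Set Int)))).2.foldl
          (fun acc sc => sc.2.foldl (fun a2 c =>
            PySem.List.pySetD a2 c (PySem.List.pyGetD a2 c 0 + sc.1)) acc)
          (List.replicate ((land.headI).length : Int).toNat (0 : Int))) (fun x => x) 0
  rw [nested_fold_eq_seeds (land.length : Int) ((land.headI).length : Int)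
      (stepA land (land.length : Int) ((land.headI).length : Int)),
    nested_fold_eq_seeds (land.length : Int) ((land.headI).length : Int)
      (stepB land (land.length : Int) ((land.headI).length : Int))]
  exact phase2_eq land (land.length : Int) ((land.headI).length : Int) hm0 _ _ hC hcov

-- ===== VERDICT (by name: the statement is the Claim_ definition above) =====
theorem solution_spec : Claim_equal_solution := by
  intro land _ _
  unfold Spec_solution
  exact main_equiv land
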